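-- pv_equiv track=rewrite | github.com/gilesknap/peyote-pattern | peyote/patterns.py | scales
-- ===== SOURCE A (Python) =====
-- def scales(columns: int, rows: int, radius: int = 3,
--            color1: int = 1, color2: int = 2, bg: int = 0) -> list[list[int]]:
--     """Fish / dragon scales — alternating arc rows in two colors.
--
--     Each scale row is *radius* beads tall. Adjacent scale rows shift by
--     *radius* columns so arcs interlock like a real scale mosaic.
--     """
--     grid = []
--     period = radius * 2
--     for r in range(rows):
--         scale_row = r // radius
--         row_in_scale = r % radius
--         offset = radius if scale_row % 2 else 0
--         color = color1 if scale_row % 2 == 0 else color2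
--         row = [bg] * columns
--         for c in range(columns):
--             tile_c = (c + offset) % period
--             dx = tile_c - radius
--             # Arc edge: points on the circle of given radius
--             dist_sq = dx * dx + row_in_scale * row_in_scale
--             if (radius - 1) ** 2 < dist_sq <= radius ** 2:
--                 row[c] = color
--             # Fill the arc bottom with the scale color for a solid look
--             elif dist_sq <= (radius - 1) ** 2 and row_in_scale >= radius - 1:
--                 row[c] = color
--         grid.append(row)
--     return grid
-- ===== SOURCE B (Python) =====
-- def scales(columns: int, rows: int, radius: int = 3,
--            color1: int = 1, color2: int = 2, bg: int = 0) -> list[list[int]]: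
--     """Same pattern, built by computing only the first full cycle of rows
--     (the grid repeats every 2*radius rows) and tiling it by modular indexing."""
--     period = radius * 2
--     inner = (radius - 1) ** 2
--     outer = radius ** 2
--
--     def on(s: int, t: int) -> bool:
--         d = (t - radius) ** 2 + s * s
--         return inner < d <= outer or (d <= inner and s >= radius - 1)
--
--     def make_row(r: int) -> list[int]:
--         s = r % radius
--         if (r // radius) % 2 == 0:
--             return [color1 if on(s, c % period) else bg for c in range(columns)]
--         return [color2 if on(s, (c + radius) % period) else bg
--                 for c in range(columns)]
--
--     block = [make_row(r) for r in range(min(rows, period))]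
--     return [block[r % period] for r in range(rows)]
-- ===== Notes on version B (the rewrite author's own statement) =====
-- stated objective: alternative
-- what changed: B computes only the first full cycle of rows (the grid repeats every 2*radius rows), each as a comprehension over a boolean arc test, and assembles the grid by modular indexing into that block, instead of A's per-cell geometry test with index assignment re-run for every row; Pre_ keeps the geometric domain radius >= 1 (or rows <= 0): for radius = 0 with rows > 0 A raises ZeroDivisionError, and for negative radius with rows > 0 B's naturally empty row block raises IndexError while A returns a grid from degenerate modular arithmetic.
-- outside the precondition, e.g. on scales(4, 3, -2, 1, 2, 0): A returns [[1, 1, 1, 1], [2, 2, 2, 2], [2, 2, 2, 2]], B raises IndexError; on scales(4, 3, 0, 1, 2, 0): A raises ZeroDivisionError, B raises ZeroDivisionError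
import Mathlib
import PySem

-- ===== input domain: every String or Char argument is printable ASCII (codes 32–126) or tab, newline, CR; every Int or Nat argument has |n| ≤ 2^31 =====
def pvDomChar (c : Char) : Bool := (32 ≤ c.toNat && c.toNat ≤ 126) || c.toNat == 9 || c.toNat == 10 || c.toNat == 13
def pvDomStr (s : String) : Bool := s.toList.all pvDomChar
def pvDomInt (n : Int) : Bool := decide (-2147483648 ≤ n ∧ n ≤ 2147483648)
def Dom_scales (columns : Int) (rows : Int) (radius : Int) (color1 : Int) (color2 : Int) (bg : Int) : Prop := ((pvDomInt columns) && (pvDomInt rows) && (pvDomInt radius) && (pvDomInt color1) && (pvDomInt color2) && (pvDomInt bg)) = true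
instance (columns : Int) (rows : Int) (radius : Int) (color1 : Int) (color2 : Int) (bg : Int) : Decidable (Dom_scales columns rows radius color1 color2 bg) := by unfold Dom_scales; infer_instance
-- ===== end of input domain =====

-- B computes only the first full cycle of rows (the grid repeats every 2*radius rows) and
-- tiles it by modular indexing, instead of re-running the per-cell geometry for every row;
-- return-value equivalence only.

-- ===== PORT A =====
def scales (columns : Int) (rows : Int) (radius : Int) (color1 : Int) (color2 : Int) (bg : Int) : List (List Int) :=
  let period := radius * 2
  (PySem.List.pyRange 0 rows).foldl (fun grid r =>
    let scaleRow := PySem.Int.floordiv r radius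
    let rowInScale := PySem.Int.mod r radius
    let offset := if PySem.Int.mod scaleRow 2 = 0 then (0 : Int) else radius
    let color := if PySem.Int.mod scaleRow 2 = 0 then color1 else color2
    let row := List.replicate columns.toNat bg
    let row := (PySem.List.pyRange 0 columns).foldl (fun row c =>
      let tileC := PySem.Int.mod (c + offset) period
      let dx := tileC - radius
      let distSq := dx * dx + rowInScale * rowInScale
      if (radius - 1) ^ 2 < distSq ∧ distSq ≤ radius ^ 2 then
        PySem.List.pySetD row c color
      else if distSq ≤ (radius - 1) ^ 2 ∧ rowInScale ≥ radius - 1 then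
        PySem.List.pySetD row c color
      else row) row
    grid ++ [row]) []

-- ===== PORT B =====
-- port of Source B's helper `on`
def arcOn (radius : Int) (s : Int) (t : Int) : Bool :=
  let inner := (radius - 1) ^ 2
  let outer := radius ^ 2
  let d := (t - radius) ^ 2 + s * s
  (decide (inner < d) && decide (d ≤ outer)) || (decide (d ≤ inner) && decide (radius - 1 ≤ s))

-- port of Source B's helper `make_row`
def makeRow (columns : Int) (radius : Int) (color1 : Int) (color2 : Int) (bg : Int) (r : Int) : List Int :=
  let period := radius * 2
  let s := PySem.Int.mod r radius
  if PySem.Int.mod (PySem.Int.floordiv r radius) 2 = 0 then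
    (PySem.List.pyRange 0 columns).map (fun c =>
      if arcOn radius s (PySem.Int.mod c period) then color1 else bg)
  else
    (PySem.List.pyRange 0 columns).map (fun c =>
      if arcOn radius s (PySem.Int.mod (c + radius) period) then color2 else bg)

def scales_alt (columns : Int) (rows : Int) (radius : Int) (color1 : Int) (color2 : Int) (bg : Int) : List (List Int) :=
  let period := radius * 2
  let block := (PySem.List.pyRange 0 (min rows period)).map
    (fun r => makeRow columns radius color1 color2 bg r)
  (PySem.List.pyRange 0 rows).map (fun r =>
    PySem.List.pyGetD block (PySem.Int.mod r period) [])

-- ===== PRECONDITION & SPEC =====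
-- Pre_ excludes the inputs with rows > 0 on which A's `r // radius` raises ZeroDivisionError
-- (radius = 0) and the non-geometric negative radii, where B's empty arc table raises
-- IndexError while A still returns a grid.
def Pre_scales (columns : Int) (rows : Int) (radius : Int) (color1 : Int) (color2 : Int) (bg : Int) : Prop :=
  rows ≤ 0 ∨ 1 ≤ radius
instance (columns : Int) (rows : Int) (radius : Int) (color1 : Int) (color2 : Int) (bg : Int) : Decidable (Pre_scales columns rows radius color1 color2 bg) := by unfold Pre_scales; infer_instance

def pvWitness_scales : Int × Int × Int × Int × Int × Int := (7, 6, 3, 1, 2, 0)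

def Spec_scales (columns : Int) (rows : Int) (radius : Int) (color1 : Int) (color2 : Int) (bg : Int) (out : List (List Int)) : Prop := out = scales_alt columns rows radius color1 color2 bg
instance (columns : Int) (rows : Int) (radius : Int) (color1 : Int) (color2 : Int) (bg : Int) (out : List (List Int)) : Decidable (Spec_scales columns rows radius color1 color2 bg out) := by unfold Spec_scales; infer_instance

-- ===== CLAIM (what is proved, stated in full; the proofs are below) =====
def Claim_equal_scales : Prop := ∀ (columns : Int) (rows : Int) (radius : Int) (color1 : Int) (color2 : Int) (bg : Int), Dom_scales columns rows radius color1 color2 bg → Pre_scales columns rows radius color1 color2 bg → Spec_scales columns rows radius color1 color2 bg (scales columns rows radius color1 color2 bg)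

-- ===== LEMMAS AND PROOFS =====

lemma pyRange_nonpos {b : Int} (h : b ≤ 0) : PySem.List.pyRange 0 b = [] := by
  simp [PySem.List.pyRange, h]

lemma length_pyRange_nat (n : Nat) : (PySem.List.pyRange 0 (n : Int)).length = n := by
  rw [PySem.List.pyRange_zero_natCast]; simp

-- a left-to-right fold that writes index c (for c in range(n)) into a d-filled buffer
-- produces the mapped prefix, untouched tail
lemma foldl_set_replicate (P : Int → Bool) (v d : Int) :
    ∀ (n m : Nat), n ≤ m →
      (PySem.List.pyRange 0 (n : Int)).foldl
        (fun row c => if P c then PySem.List.pySetD row c v else row)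
        (List.replicate m d)
      = (PySem.List.pyRange 0 (n : Int)).map (fun c => if P c then v else d)
        ++ List.replicate (m - n) d := by
  intro n
  induction n with
  | zero => intro m _; rw [show ((0:Nat):Int) = 0 from rfl, pyRange_nonpos le_rfl]; simp
  | succ k ih =>
    intro m hm
    have hk : (0 : Int) ≤ (k : Int) := by positivity
    have hcast : ((k + 1 : Nat) : Int) = (k : Int) + 1 := by push_cast; ring
    rw [hcast, PySem.List.pyRange_one_succ_right hk, List.foldl_append, List.map_append,
      ih m (by omega)]
    have hlen : ((PySem.List.pyRange 0 (k : Int)).map (fun c => if P c then v else d)).length = k := by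
      rw [List.length_map, length_pyRange_nat]
    have hrep : List.replicate (m - k) d = d :: List.replicate (m - (k + 1)) d := by
      have : m - k = (m - (k + 1)) + 1 := by omega
      rw [this, List.replicate_succ]
    simp only [List.foldl_cons, List.foldl_nil, List.map_cons, List.map_nil]
    by_cases hp : P (k : Int)
    · simp only [hp, if_true, PySem.List.pySetD_natCast]
      rw [List.set_append_right _ _ (by omega), hlen, hrep]
      simp
    · simp [hp, hrep]

-- collapse A's two writing branches into one condition
lemma foldl_two_branch (C1 C2 : Int → Prop) [DecidablePred C1] [DecidablePred C2]
    (v : Int) (l : List Int) (init : List Int) :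
    l.foldl (fun row c =>
        if C1 c then PySem.List.pySetD row c v
        else if C2 c then PySem.List.pySetD row c v else row) init
    = l.foldl (fun row c =>
        if decide (C1 c) || decide (C2 c) then PySem.List.pySetD row c v else row) init := by
  apply PySem.List.foldl_congr_mem
  intro acc x _
  by_cases h1 : C1 x <;> by_cases h2 : C2 x <;> simp [h1, h2]

-- A's inner loop over range(columns) equals the comprehension over the same range
lemma rowA_eq_map (columns : Int) (P : Int → Bool) (v d : Int) :
    (PySem.List.pyRange 0 columns).foldl
      (fun row c => if P c then PySem.List.pySetD row c v else row)
      (List.replicate columns.toNat d)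
    = (PySem.List.pyRange 0 columns).map (fun c => if P c then v else d) := by
  rcases (show columns ≤ 0 ∨ 0 < columns by omega) with h | h
  · rw [pyRange_nonpos h]; simp [Int.toNat_eq_zero.mpr h]
  · have hc : columns = (columns.toNat : Int) := by omega
    rw [hc]
    have := foldl_set_replicate P v d columns.toNat columns.toNat le_rfl
    simp only [Int.toNat_natCast]
    rw [this]; simp

-- the pattern repeats every 2*radius rows: same line index and same parity
lemma mod_mod_period (radius r : Int) (h : 0 < radius) :
    PySem.Int.mod (PySem.Int.mod r (radius * 2)) radius = PySem.Int.mod r radius := by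
  rw [PySem.Int.mod_eq_emod_of_pos (by omega : (0:Int) < radius * 2),
    PySem.Int.mod_eq_emod_of_pos h, PySem.Int.mod_eq_emod_of_pos h,
    Int.emod_emod_of_dvd _ ⟨2, rfl⟩]

lemma parity_mod_period (radius r : Int) (h : 0 < radius) :
    PySem.Int.mod (PySem.Int.floordiv (PySem.Int.mod r (radius * 2)) radius) 2
      = PySem.Int.mod (PySem.Int.floordiv r radius) 2 := by
  rw [PySem.Int.mod_eq_emod_of_pos (by omega : (0:Int) < radius * 2),
    PySem.Int.floordiv_eq_ediv_of_pos h, PySem.Int.floordiv_eq_ediv_of_pos h,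
    PySem.Int.mod_eq_emod_of_pos (by omega : (0:Int) < 2),
    PySem.Int.mod_eq_emod_of_pos (by omega : (0:Int) < 2)]
  have hd : r % (radius * 2) = r + (-2) * (r / (radius * 2)) * radius := by
    rw [Int.emod_def]; ring
  rw [hd, Int.add_mul_ediv_right _ _ (by omega : radius ≠ 0)]
  omega

lemma mod_le_self_of_nonneg (a b : Int) (hb : 0 < b) (ha : 0 ≤ a) :
    PySem.Int.mod a b ≤ a := by
  rw [PySem.Int.mod_eq_emod_of_pos hb, Int.emod_def]
  have : 0 ≤ b * (a / b) := mul_nonneg (by omega) (Int.ediv_nonneg ha (by omega))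
  omega

theorem scales_spec : Claim_equal_scales := by
  intro columns rows radius color1 color2 bg _ hpre
  unfold Spec_scales scales scales_alt
  rcases (show rows ≤ 0 ∨ 0 < rows by omega) with hr | hr
  · simp [pyRange_nonpos hr]
  · have hrad : 1 ≤ radius := by
      rcases hpre with h | h
      · omega
      · exact h
    have hradpos : (0 : Int) < radius := by omega
    have hper : (0 : Int) < radius * 2 := by omega
    rw [PySem.List.foldl_append_singleton_eq_map]
    simp only [List.nil_append]
    apply List.map_congr_left
    intro r hrmem
    have hr0 : 0 ≤ r := (PySem.List.mem_pyRange_one.mp hrmem).1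
    have hrlt : r < rows := (PySem.List.mem_pyRange_one.mp hrmem).2
    have hidx0 : 0 ≤ PySem.Int.mod r (radius * 2) := PySem.Int.mod_nonneg r hper
    have hidxp : PySem.Int.mod r (radius * 2) < radius * 2 := PySem.Int.mod_lt r hper
    have hidxr : PySem.Int.mod r (radius * 2) < rows :=
      lt_of_le_of_lt (mod_le_self_of_nonneg r (radius * 2) hper hr0) hrlt
    rw [PySem.List.pyGetD_map_pyRange_of_nonneg _ (min rows (radius * 2)) _ [] hidx0
      (lt_min hidxr hidxp)]
    unfold makeRow
    rw [mod_mod_period radius r hradpos, parity_mod_period radius r hradpos]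
    rw [foldl_two_branch, rowA_eq_map]
    by_cases hpar : PySem.Int.mod (PySem.Int.floordiv r radius) 2 = 0
    · simp only [hpar, if_true]
      apply List.map_congr_left
      intro c _
      simp [arcOn, pow_two]
    · simp only [hpar, if_false]
      apply List.map_congr_left
      intro c _
      simp [arcOn, pow_two]
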